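-- pv_equiv track=rewrite | github.com/jeroen404/advent2025 | day03.py | part1_max
-- ===== SOURCE A (Python) =====
-- def part1_max(capacities):
--     max1 = 0
--     max2 = 0
--     for i in range(len(capacities)-1):
--         if capacities[i] > max1:
--             max1 = capacities[i]
--             max2 = 0
--             # it would be better to find max2 in the end but who cares
--             for j in range(i+1, len(capacities)):
--                 if capacities[j] > max2:
--                     max2 = capacities[j]
--     return max1 * 10 + max2
-- ===== SOURCE B (Python) =====
-- def part1_max(capacities):
--     head = capacities[:-1]
--     m1 = max(head, default=0)
--     if m1 <= 0:
--         return 0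
--     i = head.index(m1)
--     m2 = max(capacities[i + 1:], default=0)
--     return m1 * 10 + max(m2, 0)
-- ===== Notes on version B (the rewrite author's own statement) =====
-- stated objective: faster
-- what changed: Replaces the record-scan loop with a quadratic inner suffix rescan by a closed-form three-step computation: max of all but the last element, first index of that max, then one suffix max.
import Mathlib
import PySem

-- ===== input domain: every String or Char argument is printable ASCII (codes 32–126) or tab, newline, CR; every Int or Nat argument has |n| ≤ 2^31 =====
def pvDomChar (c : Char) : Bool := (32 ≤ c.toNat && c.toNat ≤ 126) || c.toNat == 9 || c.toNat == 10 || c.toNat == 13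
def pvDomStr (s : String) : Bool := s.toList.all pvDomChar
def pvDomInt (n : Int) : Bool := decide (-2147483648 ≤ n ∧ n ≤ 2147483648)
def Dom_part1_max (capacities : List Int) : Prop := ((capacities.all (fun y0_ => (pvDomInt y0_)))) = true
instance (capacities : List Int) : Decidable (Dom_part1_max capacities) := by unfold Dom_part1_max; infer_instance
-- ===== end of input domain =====

-- B replaces A's nested loops (a rescan of the whole suffix at every new running max) by a
-- single max / first-index / one suffix-max computation; same return value on every input.

-- ===== PORT A =====
def part1_max (capacities : List Int) : Int :=
  let n : Int := capacities.length
  let st := (PySem.List.pyRange 0 (n - 1) 1).foldl (fun (st : Int × Int) i =>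
    if PySem.List.pyGetD capacities i 0 > st.1 then
      (PySem.List.pyGetD capacities i 0,
        (PySem.List.pyRange (i + 1) n 1).foldl (fun m2 j =>
          if PySem.List.pyGetD capacities j 0 > m2 then PySem.List.pyGetD capacities j 0 else m2) 0)
    else st) (0, 0)
  st.1 * 10 + st.2

-- ===== PORT B =====
def part1_max_alt (capacities : List Int) : Int :=
  let head := PySem.List.slice capacities none (some (-1))
  let m1 := (PySem.List.max? head (fun y => y)).getD 0
  if m1 ≤ 0 then 0
  else
    match PySem.List.index? head m1 with
    | none => 0  -- unreachable: m1 is the (positive) max of head, hence a member of head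
    | some i =>
      let m2 := (PySem.List.max? (PySem.List.slice capacities (some ((i : Int) + 1)) none) (fun y => y)).getD 0
      m1 * 10 + max m2 0

-- ===== PRECONDITION & SPEC =====
def Spec_part1_max (capacities : List Int) (out : Int) : Prop := out = part1_max_alt capacities
instance (capacities : List Int) (out : Int) : Decidable (Spec_part1_max capacities out) := by unfold Spec_part1_max; infer_instance

-- ===== CLAIM (what is proved, stated in full; the proofs are below) =====
def Claim_equal_part1_max : Prop := ∀ (capacities : List Int), Dom_part1_max capacities → Spec_part1_max capacities (part1_max capacities)

-- ===== LEMMAS AND PROOFS =====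

-- running max of a list starting from m
def fmax (l : List Int) (m : Int) : Int := l.foldl max m

-- structural model of A's outer loop (the last list element is never an outer-loop index)
def loopA : List Int → Int × Int → Int × Int
  | [], st => st
  | [_], st => st
  | v :: w :: r, st =>
      loopA (w :: r) (if v > st.1 then (v, fmax (w :: r) 0) else st)

theorem foldl_if_eq_fmax (l : List Int) (m : Int) :
    l.foldl (fun m v => if v > m then v else m) m = fmax l m := by
  unfold fmax
  congr 1
  funext a b
  simp only [max_def]
  split_ifs <;> omega

theorem fmax_cons (x : Int) (l : List Int) (m : Int) : fmax (x :: l) m = fmax l (max m x) := rfl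

theorem le_fmax (l : List Int) (m : Int) : m ≤ fmax l m := by
  induction l generalizing m with
  | nil => simp [fmax]
  | cons x t ih => rw [fmax_cons]; exact le_trans (le_max_left m x) (ih _)

theorem fmax_mem_of_gt (l : List Int) (m : Int) (h : fmax l m > m) : fmax l m ∈ l := by
  induction l generalizing m with
  | nil => simp [fmax] at h
  | cons x t ih =>
    rw [fmax_cons] at h ⊢
    by_cases hx : x ≤ m
    · rw [max_eq_left hx] at h ⊢
      exact List.mem_cons_of_mem _ (ih m h)
    · have hx' : m ≤ x := by omega
      rw [max_eq_right hx'] at h ⊢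
      rcases eq_or_lt_of_le (le_fmax t x) with he | hgt
      · rw [← he]; exact List.mem_cons_self
      · exact List.mem_cons_of_mem _ (ih x hgt)

theorem loopA_short (l : List Int) (st : Int × Int) (h : l.length ≤ 1) : loopA l st = st := by
  match l with
  | [] => rfl
  | [x] => rfl
  | x :: y :: r => simp at h

-- characterization of A's loop: final state is the prefix max (if it beats the baseline)
-- together with the max of what follows its first occurrence
theorem loopA_char (c : List Int) : ∀ m1 m2 : Int,
    loopA c (m1, m2) =
      if fmax c.dropLast m1 > m1 then
        (fmax c.dropLast m1,
          fmax (c.drop (c.dropLast.idxOf (fmax c.dropLast m1) + 1)) 0)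
      else (m1, m2) := by
  induction c with
  | nil => intro m1 m2; simp [loopA, fmax]
  | cons v t ih =>
    intro m1 m2
    match t with
    | [] => simp [loopA, fmax]
    | w :: r =>
      have hdl : (v :: w :: r).dropLast = v :: (w :: r).dropLast := by
        simp [List.dropLast]
      rw [hdl]
      by_cases hv : v > m1
      · -- record at v
        rw [show loopA (v :: w :: r) (m1, m2) = loopA (w :: r) (v, fmax (w :: r) 0) by
              simp [loopA, hv]]
        rw [ih v (fmax (w :: r) 0)]
        have hMv : fmax (v :: (w :: r).dropLast) m1 = fmax (w :: r).dropLast v := by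
          rw [fmax_cons, max_eq_right hv.le]
        rw [hMv]
        have hvM : v ≤ fmax (w :: r).dropLast v := le_fmax _ v
        rw [if_pos (show fmax (w :: r).dropLast v > m1 by omega)]
        by_cases hM : fmax (w :: r).dropLast v > v
        · rw [if_pos hM]
          rw [List.idxOf_cons_ne _ (show v ≠ fmax (w :: r).dropLast v by omega)]
          simp [List.drop_succ_cons]
        · have hMeq : fmax (w :: r).dropLast v = v := by omega
          rw [if_neg hM, hMeq, List.idxOf_cons_self]
          simp
      · -- v is not a record
        rw [show loopA (v :: w :: r) (m1, m2) = loopA (w :: r) (m1, m2) by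
              simp [loopA, hv]]
        rw [ih m1 m2]
        rw [fmax_cons, max_eq_left (by omega)]
        by_cases hgt : fmax (w :: r).dropLast m1 > m1
        · rw [if_pos hgt, if_pos hgt]
          rw [List.idxOf_cons_ne _ (show v ≠ fmax (w :: r).dropLast m1 by omega)]
          simp [List.drop_succ_cons]
        · rw [if_neg hgt, if_neg hgt]

theorem outer_bridge (cs : List Int) : ∀ (k a : Nat), cs.length - a ≤ k → ∀ st : Int × Int,
    (PySem.List.pyRange (a : Int) ((cs.length : Int) - 1) 1).foldl
      (fun (st : Int × Int) i =>
        if PySem.List.pyGetD cs i 0 > st.1 then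
          (PySem.List.pyGetD cs i 0,
            (PySem.List.pyRange (i + 1) ((cs.length : Int)) 1).foldl
              (fun m2 j => if PySem.List.pyGetD cs j 0 > m2 then PySem.List.pyGetD cs j 0 else m2) 0)
        else st) st
    = loopA (cs.drop a) st := by
  intro k
  induction k with
  | zero =>
    intro a hk st
    have ha : cs.length ≤ a := by omega
    rw [PySem.List.pyRange_one_eq_nil (by omega)]
    rw [List.drop_eq_nil_of_le ha]
    rfl
  | succ k ihk =>
    intro a hk st
    by_cases h : (a : Int) < (cs.length : Int) - 1
    · have ha1 : a + 1 < cs.length := by omega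
      have ha : a < cs.length := by omega
      rw [PySem.List.pyRange_one_cons h, List.foldl_cons]
      have hcast : (a : Int) + 1 = ((a + 1 : Nat) : Int) := by push_cast; ring
      rw [hcast, ihk (a + 1) (by omega)]
      have hget : PySem.List.pyGetD cs ((a : Nat) : Int) 0 = cs[a] := by
        rw [PySem.List.pyGetD_natCast, List.getD_eq_getElem _ _ ha]
      have hinner :
          (PySem.List.pyRange (((a + 1 : Nat) : Int)) ((cs.length : Int)) 1).foldl
            (fun m2 j => if PySem.List.pyGetD cs j 0 > m2 then PySem.List.pyGetD cs j 0 else m2) 0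
          = fmax (cs.drop (a + 1)) 0 := by
        have h0 : (0 : Int) ≤ ((a + 1 : Nat) : Int) := Int.natCast_nonneg _
        rw [PySem.List.foldl_pyRange_pyGetD' cs 0
              (fun m v => if v > m then v else m) 0 h0]
        rw [Int.toNat_natCast, foldl_if_eq_fmax]
      rw [hget, hinner]
      rw [List.drop_eq_getElem_cons ha, List.drop_eq_getElem_cons ha1]
      show loopA _ _ = _
      rw [show loopA (cs[a] :: cs[a + 1] :: cs.drop (a + 1 + 1)) st
            = loopA (cs[a + 1] :: cs.drop (a + 1 + 1))
                (if cs[a] > st.1 then (cs[a], fmax (cs[a + 1] :: cs.drop (a + 1 + 1)) 0) else st) from rfl]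
    · rw [PySem.List.pyRange_one_eq_nil (by omega)]
      rw [loopA_short _ _ (by simp [List.length_drop]; omega)]
      rfl

theorem part1_max_eq_loopA (c : List Int) :
    part1_max c = (loopA c (0, 0)).1 * 10 + (loopA c (0, 0)).2 := by
  have h := outer_bridge c c.length 0 (by omega) (0, 0)
  simp only [Nat.cast_zero, List.drop_zero] at h
  simp only [part1_max]
  rw [h]

theorem index?_of_mem (l : List Int) (v : Int) (h : v ∈ l) :
    PySem.List.index? l v = some (l.idxOf v) := by
  induction l with
  | nil => simp at h
  | cons x t ih =>
    by_cases hx : x = v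
    · subst hx
      rw [PySem.List.index?_cons_self, List.idxOf_cons_self]
    · rw [PySem.List.index?_cons_of_ne _ hx, List.idxOf_cons_ne _ hx,
          ih (List.mem_of_ne_of_mem (Ne.symm hx) h)]
      rfl

theorem part1_max_alt_eq (c : List Int) :
    part1_max_alt c = (loopA c (0, 0)).1 * 10 + (loopA c (0, 0)).2 := by
  rw [loopA_char c 0 0]
  simp only [part1_max_alt]
  rw [PySem.List.slice_to_neg_one]
  cases hdl : c.dropLast with
  | nil => simp [fmax]
  | cons x t =>
    rw [PySem.List.max?_id_cons]
    have hfm : fmax (x :: t) 0 = max 0 (t.foldl max x) := by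
      rw [fmax_cons]
      show t.foldl max (max 0 x) = _
      rw [List.foldl_assoc]
    simp only [Option.getD_some]
    by_cases hm : t.foldl max x ≤ 0
    · rw [if_pos hm, if_neg (by rw [hfm]; omega)]
      simp
    · rw [if_neg hm]
      have hpos : fmax (x :: t) 0 > 0 := by rw [hfm]; omega
      have hMeq : fmax (x :: t) 0 = t.foldl max x := by rw [hfm]; omega
      have hmem : t.foldl max x ∈ x :: t := by
        rw [← hMeq]; exact fmax_mem_of_gt _ _ hpos
      rw [index?_of_mem _ _ hmem]
      rw [if_pos hpos, hMeq]
      dsimp only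
      have hslice : PySem.List.slice c (some (((x :: t).idxOf (t.foldl max x) : Int) + 1)) none
          = c.drop ((x :: t).idxOf (t.foldl max x) + 1) := by
        rw [show (((x :: t).idxOf (t.foldl max x) : Int) + 1)
              = (((x :: t).idxOf (t.foldl max x) + 1 : Nat) : Int) by push_cast; ring]
        rw [PySem.List.slice_from_natCast]
      rw [hslice]
      cases hdr : c.drop ((x :: t).idxOf (t.foldl max x) + 1) with
      | nil =>
        rw [show PySem.List.max? ([] : List Int) (fun y => y) = none from
              (PySem.List.max?_eq_none_iff _ _).mpr rfl]
        simp [fmax]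
      | cons y s =>
        rw [PySem.List.max?_id_cons]
        simp only [Option.getD_some]
        have hy : fmax (y :: s) 0 = max (s.foldl max y) 0 := by
          rw [fmax_cons]
          show s.foldl max (max 0 y) = _
          rw [List.foldl_assoc, max_comm]
        rw [hy]

-- ===== VERDICT (by name: the statement is the Claim_ definition above) =====
theorem part1_max_spec : Claim_equal_part1_max := by
  intro c _
  unfold Spec_part1_max
  rw [part1_max_eq_loopA, part1_max_alt_eq]
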